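-- pv_equiv track=rewrite | github.com/fearlessronin/ihc-obstruction-lab | src/ihc_lab/literature/keyword_hints.py | infer_channel_hints
-- ===== SOURCE A (Python) =====
-- def _append_unique(items: list[str], item: str) -> None:
--     if item not in items:
--         items.append(item)
--
-- def _contains(text_lower: str, phrase: str) -> bool:
--     return phrase.lower() in text_lower
--
-- def infer_channel_hints(text: str) -> dict[str, list[str]]:
--     text_lower = text.lower()
--     channel_hints: list[str] = []
--     operation_hints: list[str] = []
--     bottleneck_hints: list[str] = []
--     matched_keywords: list[str] = []
--
--     def match(keyword: str) -> bool:
--         if _contains(text_lower, keyword):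
--             _append_unique(matched_keywords, keyword)
--             return True
--         return False
--
--     has_unramified = match("unramified")
--     has_residue = match("residue")
--     if has_unramified or has_residue:
--         _append_unique(channel_hints, "brauer_unramified")
--         if has_residue:
--             _append_unique(operation_hints, "residue_test")
--         if has_unramified:
--             _append_unique(operation_hints, "unramified_survival")
--         _append_unique(bottleneck_hints, "verify_survival_statement")
--
--     if match("Brauer"):
--         _append_unique(channel_hints, "brauer_unramified")
--         _append_unique(bottleneck_hints, "brauer_nonzero")
--
--     if match("Bockstein"):
--         _append_unique(channel_hints, "cup_product_bockstein")
--         _append_unique(operation_hints, "bockstein")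
--
--     if match("cup product"):
--         _append_unique(operation_hints, "cup_product")
--
--     lattice_terms = [
--         "Smith normal form",
--         "elementary divisors",
--         "lattice of Hodge cycles",
--         "Hodge cycle lattice",
--         "lattice",
--     ]
--     lattice_matches = [term for term in lattice_terms if match(term)]
--     if lattice_matches:
--         _append_unique(channel_hints, "lattice_saturation")
--         if any(term in lattice_matches for term in ["Smith normal form", "lattice"]):
--             _append_unique(operation_hints, "smith_normal_form")
--         if "elementary divisors" in lattice_matches:
--             _append_unique(operation_hints, "elementary_divisor_comparison")
--         _append_unique(bottleneck_hints, "lattice_identification")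
--
--     if match("Enriques"):
--         _append_unique(channel_hints, "enriques_product")
--
--     if match("matroid"):
--         _append_unique(channel_hints, "matroidal_parity")
--
--     has_odp = match("ordinary double point")
--     has_nodal = match("nodal")
--     if has_odp or has_nodal:
--         _append_unique(channel_hints, "nodal_free_relation")
--         _append_unique(operation_hints, "global_relation")
--
--     has_stack = match("quotient stack")
--     has_stabilizer = match("stabilizer")
--     has_bg = match("BG")
--     if has_stack or has_stabilizer or has_bg:
--         _append_unique(channel_hints, "stacky_stabilizer")
--         _append_unique(bottleneck_hints, "stacky_realization")
--
--     if match("Fermat"):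
--         _append_unique(channel_hints, "computed_lattice_benchmark")
--
--     return {
--         "proposed_channel_hints": channel_hints,
--         "operation_hints": operation_hints,
--         "bottleneck_hints": bottleneck_hints,
--         "matched_keywords": matched_keywords,
--     }
-- ===== SOURCE B (Python) =====
-- # B: a small rule-table interpreter. Each rule is (keywords, channels, op_rules,
-- # bottlenecks); one generic loop scans every rule's keywords (in the same order A
-- # tests them) and, when a rule fires, appends its channels (with dedup), its
-- # operations (each guarded by an optional trigger-keyword set) and its bottlenecks.
-- RULES = [
--     (["unramified", "residue"], ["brauer_unramified"],
--      [(["residue"], "residue_test"), (["unramified"], "unramified_survival")],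
--      ["verify_survival_statement"]),
--     (["Brauer"], ["brauer_unramified"], [], ["brauer_nonzero"]),
--     (["Bockstein"], ["cup_product_bockstein"], [(None, "bockstein")], []),
--     (["cup product"], [], [(None, "cup_product")], []),
--     (["Smith normal form", "elementary divisors", "lattice of Hodge cycles",
--       "Hodge cycle lattice", "lattice"], ["lattice_saturation"],
--      [(["Smith normal form", "lattice"], "smith_normal_form"),
--       (["elementary divisors"], "elementary_divisor_comparison")],
--      ["lattice_identification"]),
--     (["Enriques"], ["enriques_product"], [], []),
--     (["matroid"], ["matroidal_parity"], [], []),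
--     (["ordinary double point", "nodal"], ["nodal_free_relation"],
--      [(None, "global_relation")], []),
--     (["quotient stack", "stabilizer", "BG"], ["stacky_stabilizer"], [],
--      ["stacky_realization"]),
--     (["Fermat"], ["computed_lattice_benchmark"], [], []),
-- ]
--
--
-- def infer_channel_hints(text: str) -> dict[str, list[str]]:
--     text_lower = text.lower()
--     channels: list[str] = []
--     operations: list[str] = []
--     bottlenecks: list[str] = []
--     matched: list[str] = []
--     for keywords, rule_channels, op_rules, rule_bottlenecks in RULES:
--         hits = [kw for kw in keywords if kw.lower() in text_lower]
--         matched.extend(hits)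
--         if hits:
--             for ch in rule_channels:
--                 if ch not in channels:
--                     channels.append(ch)
--             for triggers, op in op_rules:
--                 if triggers is None or any(h in triggers for h in hits):
--                     operations.append(op)
--             bottlenecks.extend(rule_bottlenecks)
--     return {
--         "proposed_channel_hints": channels,
--         "operation_hints": operations,
--         "bottleneck_hints": bottlenecks,
--         "matched_keywords": matched,
--     }
-- ===== Notes on version B (the rewrite author's own statement) =====
-- stated objective: alternative
-- what changed: A is a hand-written cascade of if-blocks, each mutating four lists through a stateful match() closure and _append_unique; B is a data-driven interpreter: the whole rule set lives in one literal table (keywords, channels, trigger-guarded operations, bottlenecks) and a single generic loop applies each rule to the accumulator state.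
import Mathlib
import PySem

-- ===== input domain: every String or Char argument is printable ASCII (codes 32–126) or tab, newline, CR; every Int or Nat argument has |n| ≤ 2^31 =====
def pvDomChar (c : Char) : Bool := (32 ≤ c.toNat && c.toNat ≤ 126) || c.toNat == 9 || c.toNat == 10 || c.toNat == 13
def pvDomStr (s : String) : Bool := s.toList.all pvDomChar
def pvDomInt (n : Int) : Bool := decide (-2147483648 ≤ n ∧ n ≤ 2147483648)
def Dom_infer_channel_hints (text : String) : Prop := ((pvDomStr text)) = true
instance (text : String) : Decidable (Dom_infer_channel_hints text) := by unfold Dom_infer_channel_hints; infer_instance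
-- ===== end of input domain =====

-- B replaces A's hand-written cascade of if-blocks by a data-driven interpreter: one literal
-- rule table and a single generic loop applying each rule to the accumulator; same return value.

-- ===== PORT A =====
-- _append_unique
def pvAu (items : List String) (item : String) : List String :=
  if items.contains item then items else items ++ [item]

-- _contains(text_lower, phrase) = phrase.lower() in text_lower
def pvContains (tl phrase : String) : Bool := PySem.Str.isIn (PySem.Str.lower phrase) tl

-- the closure `match`: threads matched_keywords, returns the flag
def pvMatch (tl : String) (mk : List String) (kw : String) : List String × Bool :=
  if pvContains tl kw then (pvAu mk kw, true) else (mk, false)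

-- state = (channel_hints, operation_hints, bottleneck_hints, matched_keywords)
-- A's straight-line body, block by block in source order:
def pvBlockUR (tl : String) (s : List String × List String × List String × List String) :
    List String × List String × List String × List String :=
  let r1 := pvMatch tl s.2.2.2 "unramified"
  let r2 := pvMatch tl r1.1 "residue"
  if r1.2 || r2.2 then
    (pvAu s.1 "brauer_unramified",
     (let o1 := if r2.2 then pvAu s.2.1 "residue_test" else s.2.1
      if r1.2 then pvAu o1 "unramified_survival" else o1),
     pvAu s.2.2.1 "verify_survival_statement",
     r2.1)
  else (s.1, s.2.1, s.2.2.1, r2.1)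

def pvBlockBrauer (tl : String) (s : List String × List String × List String × List String) :
    List String × List String × List String × List String :=
  let r := pvMatch tl s.2.2.2 "Brauer"
  if r.2 then (pvAu s.1 "brauer_unramified", s.2.1, pvAu s.2.2.1 "brauer_nonzero", r.1)
  else (s.1, s.2.1, s.2.2.1, r.1)

def pvBlockBockstein (tl : String) (s : List String × List String × List String × List String) :
    List String × List String × List String × List String :=
  let r := pvMatch tl s.2.2.2 "Bockstein"
  if r.2 then (pvAu s.1 "cup_product_bockstein", pvAu s.2.1 "bockstein", s.2.2.1, r.1)
  else (s.1, s.2.1, s.2.2.1, r.1)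

def pvBlockCup (tl : String) (s : List String × List String × List String × List String) :
    List String × List String × List String × List String :=
  let r := pvMatch tl s.2.2.2 "cup product"
  if r.2 then (s.1, pvAu s.2.1 "cup_product", s.2.2.1, r.1)
  else (s.1, s.2.1, s.2.2.1, r.1)

def pvLatticeTerms : List String :=
  ["Smith normal form", "elementary divisors", "lattice of Hodge cycles",
   "Hodge cycle lattice", "lattice"]

def pvBlockLattice (tl : String) (s : List String × List String × List String × List String) :
    List String × List String × List String × List String :=
  -- lattice_matches = [term for term in lattice_terms if match(term)]
  let r := pvLatticeTerms.foldl
    (fun (acc : List String × List String) t =>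
      let m := pvMatch tl acc.1 t
      (m.1, if m.2 then acc.2 ++ [t] else acc.2)) (s.2.2.2, [])
  let lm := r.2
  if lm ≠ [] then
    (pvAu s.1 "lattice_saturation",
     (let o1 := if (["Smith normal form", "lattice"].any fun t => lm.contains t) then
                  pvAu s.2.1 "smith_normal_form" else s.2.1
      if lm.contains "elementary divisors" then pvAu o1 "elementary_divisor_comparison" else o1),
     pvAu s.2.2.1 "lattice_identification",
     r.1)
  else (s.1, s.2.1, s.2.2.1, r.1)

def pvBlockEnriques (tl : String) (s : List String × List String × List String × List String) :
    List String × List String × List String × List String :=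
  let r := pvMatch tl s.2.2.2 "Enriques"
  if r.2 then (pvAu s.1 "enriques_product", s.2.1, s.2.2.1, r.1)
  else (s.1, s.2.1, s.2.2.1, r.1)

def pvBlockMatroid (tl : String) (s : List String × List String × List String × List String) :
    List String × List String × List String × List String :=
  let r := pvMatch tl s.2.2.2 "matroid"
  if r.2 then (pvAu s.1 "matroidal_parity", s.2.1, s.2.2.1, r.1)
  else (s.1, s.2.1, s.2.2.1, r.1)

def pvBlockNodal (tl : String) (s : List String × List String × List String × List String) :
    List String × List String × List String × List String :=
  let r1 := pvMatch tl s.2.2.2 "ordinary double point"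
  let r2 := pvMatch tl r1.1 "nodal"
  if r1.2 || r2.2 then
    (pvAu s.1 "nodal_free_relation", pvAu s.2.1 "global_relation", s.2.2.1, r2.1)
  else (s.1, s.2.1, s.2.2.1, r2.1)

def pvBlockStack (tl : String) (s : List String × List String × List String × List String) :
    List String × List String × List String × List String :=
  let r1 := pvMatch tl s.2.2.2 "quotient stack"
  let r2 := pvMatch tl r1.1 "stabilizer"
  let r3 := pvMatch tl r2.1 "BG"
  if r1.2 || r2.2 || r3.2 then
    (pvAu s.1 "stacky_stabilizer", s.2.1, pvAu s.2.2.1 "stacky_realization", r3.1)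
  else (s.1, s.2.1, s.2.2.1, r3.1)

def pvBlockFermat (tl : String) (s : List String × List String × List String × List String) :
    List String × List String × List String × List String :=
  let r := pvMatch tl s.2.2.2 "Fermat"
  if r.2 then (pvAu s.1 "computed_lattice_benchmark", s.2.1, s.2.2.1, r.1)
  else (s.1, s.2.1, s.2.2.1, r.1)

def infer_channel_hints (text : String) : List (String × List String) :=
  let tl := PySem.Str.lower text
  let s := pvBlockFermat tl (pvBlockStack tl (pvBlockNodal tl (pvBlockMatroid tl
             (pvBlockEnriques tl (pvBlockLattice tl (pvBlockCup tl (pvBlockBockstein tl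
               (pvBlockBrauer tl (pvBlockUR tl ([], [], [], []))))))))))
  [("proposed_channel_hints", s.1), ("operation_hints", s.2.1),
   ("bottleneck_hints", s.2.2.1), ("matched_keywords", s.2.2.2)]

-- ===== PORT B =====
-- the rule table: (keywords, channels, [(optional trigger keywords, operation)], bottlenecks)
def pvRules : List (List String × List String × List (Option (List String) × String) × List String) :=
  [(["unramified", "residue"], ["brauer_unramified"],
    [(some ["residue"], "residue_test"), (some ["unramified"], "unramified_survival")],
    ["verify_survival_statement"]),
   (["Brauer"], ["brauer_unramified"], [], ["brauer_nonzero"]),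
   (["Bockstein"], ["cup_product_bockstein"], [(none, "bockstein")], []),
   (["cup product"], [], [(none, "cup_product")], []),
   (["Smith normal form", "elementary divisors", "lattice of Hodge cycles",
     "Hodge cycle lattice", "lattice"], ["lattice_saturation"],
    [(some ["Smith normal form", "lattice"], "smith_normal_form"),
     (some ["elementary divisors"], "elementary_divisor_comparison")],
    ["lattice_identification"]),
   (["Enriques"], ["enriques_product"], [], []),
   (["matroid"], ["matroidal_parity"], [], []),
   (["ordinary double point", "nodal"], ["nodal_free_relation"],
    [(none, "global_relation")], []),
   (["quotient stack", "stabilizer", "BG"], ["stacky_stabilizer"], [],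
    ["stacky_realization"]),
   (["Fermat"], ["computed_lattice_benchmark"], [], [])]

-- the generic interpreter: apply one rule to the accumulator state
def pvApplyRule (tl : String)
    (st : List String × List String × List String × List String)
    (r : List String × List String × List (Option (List String) × String) × List String) :
    List String × List String × List String × List String :=
  let hits := r.1.filter (fun kw => pvContains tl kw)
  let matched := st.2.2.2 ++ hits
  if hits ≠ [] then
    (r.2.1.foldl (fun acc c => if acc.contains c then acc else acc ++ [c]) st.1,
     r.2.2.1.foldl (fun acc tr =>
       if (match tr.1 with
           | none => true
           | some ts => hits.any fun h => ts.contains h) then acc ++ [tr.2] else acc) st.2.1,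
     st.2.2.1 ++ r.2.2.2,
     matched)
  else (st.1, st.2.1, st.2.2.1, matched)

def infer_channel_hints_alt (text : String) : List (String × List String) :=
  let tl := PySem.Str.lower text
  let s := pvRules.foldl (pvApplyRule tl) ([], [], [], [])
  [("proposed_channel_hints", s.1), ("operation_hints", s.2.1),
   ("bottleneck_hints", s.2.2.1), ("matched_keywords", s.2.2.2)]

-- ===== PRECONDITION & SPEC =====
def Spec_infer_channel_hints (text : String) (out : List (String × List String)) : Prop := out = infer_channel_hints_alt text
instance (text : String) (out : List (String × List String)) : Decidable (Spec_infer_channel_hints text out) := by unfold Spec_infer_channel_hints; infer_instance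

-- ===== CLAIM (what is proved, stated in full; the proofs are below) =====
def Claim_equal_infer_channel_hints : Prop := ∀ (text : String), Dom_infer_channel_hints text → Spec_infer_channel_hints text (infer_channel_hints text)

-- ===== LEMMAS AND PROOFS =====

theorem pv_mem_pvAu {xs : List String} {x y : String} : x ∈ pvAu xs y ↔ x ∈ xs ∨ x = y := by
  unfold pvAu; split
  · next h => simp only [List.contains_iff_mem] at h
              constructor
              · exact Or.inl
              · rintro (hx | rfl) <;> [exact hx; exact h]
  · simp

theorem pvAu_of_not_mem {xs : List String} {x : String} (h : x ∉ xs) : pvAu xs x = xs ++ [x] := by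
  unfold pvAu
  rw [if_neg]
  simp only [List.contains_iff_mem]
  exact h

theorem pv_mem_ite {c : Prop} [Decidable c] {x : String} {xs ys : List String} :
    x ∈ (if c then xs else ys) ↔ (c ∧ x ∈ xs) ∨ (¬ c ∧ x ∈ ys) := by
  split <;> simp [*]

-- ---- normal forms of A's blocks (requiring freshness where A dedups) ----

theorem stUR (tl : String) :
    pvBlockUR tl ([], [], [], []) =
      (if pvContains tl "unramified" || pvContains tl "residue" then ["brauer_unramified"] else [],
       if pvContains tl "unramified" || pvContains tl "residue" then
         (if pvContains tl "residue" then ["residue_test"] else []) ++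
         (if pvContains tl "unramified" then ["unramified_survival"] else [])
       else [],
       if pvContains tl "unramified" || pvContains tl "residue" then ["verify_survival_statement"] else [],
       (if pvContains tl "unramified" then ["unramified"] else []) ++
       (if pvContains tl "residue" then ["residue"] else [])) := by
  cases h1 : pvContains tl "unramified" <;> cases h2 : pvContains tl "residue" <;>
    simp [pvBlockUR, pvMatch, pvAu, h1, h2]

theorem stBrauer (tl : String) (C O T M : List String)
    (hT : "brauer_nonzero" ∉ T) (hM : "Brauer" ∉ M) :
    pvBlockBrauer tl (C, O, T, M) =
      (if pvContains tl "Brauer" then pvAu C "brauer_unramified" else C, O,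
       T ++ (if pvContains tl "Brauer" then ["brauer_nonzero"] else []),
       M ++ (if pvContains tl "Brauer" then ["Brauer"] else [])) := by
  cases h : pvContains tl "Brauer" <;>
    simp [pvBlockBrauer, pvMatch, h, pvAu_of_not_mem hT, pvAu_of_not_mem hM]

theorem stBockstein (tl : String) (C O T M : List String)
    (hC : "cup_product_bockstein" ∉ C) (hO : "bockstein" ∉ O) (hM : "Bockstein" ∉ M) :
    pvBlockBockstein tl (C, O, T, M) =
      (C ++ (if pvContains tl "Bockstein" then ["cup_product_bockstein"] else []),
       O ++ (if pvContains tl "Bockstein" then ["bockstein"] else []), T,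
       M ++ (if pvContains tl "Bockstein" then ["Bockstein"] else [])) := by
  cases h : pvContains tl "Bockstein" <;>
    simp [pvBlockBockstein, pvMatch, h, pvAu_of_not_mem hC, pvAu_of_not_mem hO, pvAu_of_not_mem hM]

theorem stCup (tl : String) (C O T M : List String)
    (hO : "cup_product" ∉ O) (hM : "cup product" ∉ M) :
    pvBlockCup tl (C, O, T, M) =
      (C, O ++ (if pvContains tl "cup product" then ["cup_product"] else []), T,
       M ++ (if pvContains tl "cup product" then ["cup product"] else [])) := by
  cases h : pvContains tl "cup product" <;>
    simp [pvBlockCup, pvMatch, h, pvAu_of_not_mem hO, pvAu_of_not_mem hM]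

theorem stLattice (tl : String) (C O T M : List String)
    (hC : "lattice_saturation" ∉ C) (hO1 : "smith_normal_form" ∉ O)
    (hO2 : "elementary_divisor_comparison" ∉ O) (hT : "lattice_identification" ∉ T)
    (h6 : "Smith normal form" ∉ M) (h7 : "elementary divisors" ∉ M)
    (h8 : "lattice of Hodge cycles" ∉ M) (h9 : "Hodge cycle lattice" ∉ M)
    (h10 : "lattice" ∉ M) :
    pvBlockLattice tl (C, O, T, M) =
      (C ++ (if pvContains tl "Smith normal form" || pvContains tl "elementary divisors" ||
                pvContains tl "lattice of Hodge cycles" || pvContains tl "Hodge cycle lattice" ||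
                pvContains tl "lattice" then ["lattice_saturation"] else []),
       O ++ (if pvContains tl "Smith normal form" || pvContains tl "elementary divisors" ||
                pvContains tl "lattice of Hodge cycles" || pvContains tl "Hodge cycle lattice" ||
                pvContains tl "lattice" then
              (if pvContains tl "Smith normal form" || pvContains tl "lattice" then
                ["smith_normal_form"] else []) ++
              (if pvContains tl "elementary divisors" then ["elementary_divisor_comparison"] else [])
             else []),
       T ++ (if pvContains tl "Smith normal form" || pvContains tl "elementary divisors" ||
                pvContains tl "lattice of Hodge cycles" || pvContains tl "Hodge cycle lattice" ||
                pvContains tl "lattice" then ["lattice_identification"] else []),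
       M ++ ((if pvContains tl "Smith normal form" then ["Smith normal form"] else []) ++
             ((if pvContains tl "elementary divisors" then ["elementary divisors"] else []) ++
              ((if pvContains tl "lattice of Hodge cycles" then ["lattice of Hodge cycles"] else []) ++
               ((if pvContains tl "Hodge cycle lattice" then ["Hodge cycle lattice"] else []) ++
                (if pvContains tl "lattice" then ["lattice"] else [])))))) := by
  cases k6 : pvContains tl "Smith normal form" <;> cases k7 : pvContains tl "elementary divisors" <;>
    cases k8 : pvContains tl "lattice of Hodge cycles" <;> cases k9 : pvContains tl "Hodge cycle lattice" <;>
      cases k10 : pvContains tl "lattice" <;>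
        simp [pvBlockLattice, pvLatticeTerms, pvMatch, k6, k7, k8, k9, k10,
              pvAu_of_not_mem, hC, hO1, hO2, hT, h6, h7, h8, h9, h10]

theorem stEnriques (tl : String) (C O T M : List String)
    (hC : "enriques_product" ∉ C) (hM : "Enriques" ∉ M) :
    pvBlockEnriques tl (C, O, T, M) =
      (C ++ (if pvContains tl "Enriques" then ["enriques_product"] else []), O, T,
       M ++ (if pvContains tl "Enriques" then ["Enriques"] else [])) := by
  cases h : pvContains tl "Enriques" <;>
    simp [pvBlockEnriques, pvMatch, h, pvAu_of_not_mem hC, pvAu_of_not_mem hM]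

theorem stMatroid (tl : String) (C O T M : List String)
    (hC : "matroidal_parity" ∉ C) (hM : "matroid" ∉ M) :
    pvBlockMatroid tl (C, O, T, M) =
      (C ++ (if pvContains tl "matroid" then ["matroidal_parity"] else []), O, T,
       M ++ (if pvContains tl "matroid" then ["matroid"] else [])) := by
  cases h : pvContains tl "matroid" <;>
    simp [pvBlockMatroid, pvMatch, h, pvAu_of_not_mem hC, pvAu_of_not_mem hM]

theorem stNodal (tl : String) (C O T M : List String)
    (hC : "nodal_free_relation" ∉ C) (hO : "global_relation" ∉ O)
    (hM1 : "ordinary double point" ∉ M) (hM2 : "nodal" ∉ M) :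
    pvBlockNodal tl (C, O, T, M) =
      (C ++ (if pvContains tl "ordinary double point" || pvContains tl "nodal" then
              ["nodal_free_relation"] else []),
       O ++ (if pvContains tl "ordinary double point" || pvContains tl "nodal" then
              ["global_relation"] else []), T,
       M ++ ((if pvContains tl "ordinary double point" then ["ordinary double point"] else []) ++
             (if pvContains tl "nodal" then ["nodal"] else []))) := by
  cases h1 : pvContains tl "ordinary double point" <;> cases h2 : pvContains tl "nodal" <;>
    simp [pvBlockNodal, pvMatch, h1, h2, pvAu_of_not_mem, hC, hO, hM1, hM2]

theorem stStack (tl : String) (C O T M : List String)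
    (hC : "stacky_stabilizer" ∉ C) (hT : "stacky_realization" ∉ T)
    (hM1 : "quotient stack" ∉ M) (hM2 : "stabilizer" ∉ M) (hM3 : "BG" ∉ M) :
    pvBlockStack tl (C, O, T, M) =
      (C ++ (if pvContains tl "quotient stack" || pvContains tl "stabilizer" ||
                pvContains tl "BG" then ["stacky_stabilizer"] else []), O,
       T ++ (if pvContains tl "quotient stack" || pvContains tl "stabilizer" ||
                pvContains tl "BG" then ["stacky_realization"] else []),
       M ++ ((if pvContains tl "quotient stack" then ["quotient stack"] else []) ++
             ((if pvContains tl "stabilizer" then ["stabilizer"] else []) ++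
              (if pvContains tl "BG" then ["BG"] else [])))) := by
  cases h1 : pvContains tl "quotient stack" <;> cases h2 : pvContains tl "stabilizer" <;>
    cases h3 : pvContains tl "BG" <;>
      simp [pvBlockStack, pvMatch, h1, h2, h3, pvAu_of_not_mem, hC, hT, hM1, hM2, hM3]

theorem stFermat (tl : String) (C O T M : List String)
    (hC : "computed_lattice_benchmark" ∉ C) (hM : "Fermat" ∉ M) :
    pvBlockFermat tl (C, O, T, M) =
      (C ++ (if pvContains tl "Fermat" then ["computed_lattice_benchmark"] else []), O, T,
       M ++ (if pvContains tl "Fermat" then ["Fermat"] else [])) := by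
  cases h : pvContains tl "Fermat" <;>
    simp [pvBlockFermat, pvMatch, h, pvAu_of_not_mem hC, pvAu_of_not_mem hM]

-- ---- the SAME normal forms for B's interpreter on each literal rule ----

theorem altUR (tl : String) :
    pvApplyRule tl ([], [], [], [])
      (["unramified", "residue"], ["brauer_unramified"],
       [(some ["residue"], "residue_test"), (some ["unramified"], "unramified_survival")],
       ["verify_survival_statement"]) =
      (if pvContains tl "unramified" || pvContains tl "residue" then ["brauer_unramified"] else [],
       if pvContains tl "unramified" || pvContains tl "residue" then
         (if pvContains tl "residue" then ["residue_test"] else []) ++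
         (if pvContains tl "unramified" then ["unramified_survival"] else [])
       else [],
       if pvContains tl "unramified" || pvContains tl "residue" then ["verify_survival_statement"] else [],
       (if pvContains tl "unramified" then ["unramified"] else []) ++
       (if pvContains tl "residue" then ["residue"] else [])) := by
  cases h1 : pvContains tl "unramified" <;> cases h2 : pvContains tl "residue" <;>
    simp [pvApplyRule, h1, h2]

theorem altBrauer (tl : String) (C O T M : List String) :
    pvApplyRule tl (C, O, T, M) (["Brauer"], ["brauer_unramified"], [], ["brauer_nonzero"]) =
      (if pvContains tl "Brauer" then pvAu C "brauer_unramified" else C, O,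
       T ++ (if pvContains tl "Brauer" then ["brauer_nonzero"] else []),
       M ++ (if pvContains tl "Brauer" then ["Brauer"] else [])) := by
  cases h : pvContains tl "Brauer" <;> simp [pvApplyRule, pvAu, h]

theorem altBockstein (tl : String) (C O T M : List String) (hC : "cup_product_bockstein" ∉ C) :
    pvApplyRule tl (C, O, T, M) (["Bockstein"], ["cup_product_bockstein"], [(none, "bockstein")], []) =
      (C ++ (if pvContains tl "Bockstein" then ["cup_product_bockstein"] else []),
       O ++ (if pvContains tl "Bockstein" then ["bockstein"] else []), T,
       M ++ (if pvContains tl "Bockstein" then ["Bockstein"] else [])) := by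
  cases h : pvContains tl "Bockstein" <;> simp [pvApplyRule, h, hC]

theorem altCup (tl : String) (C O T M : List String) :
    pvApplyRule tl (C, O, T, M) (["cup product"], [], [(none, "cup_product")], []) =
      (C, O ++ (if pvContains tl "cup product" then ["cup_product"] else []), T,
       M ++ (if pvContains tl "cup product" then ["cup product"] else [])) := by
  cases h : pvContains tl "cup product" <;> simp [pvApplyRule, h]

theorem altLattice (tl : String) (C O T M : List String) (hC : "lattice_saturation" ∉ C) :
    pvApplyRule tl (C, O, T, M)
      (["Smith normal form", "elementary divisors", "lattice of Hodge cycles",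
        "Hodge cycle lattice", "lattice"], ["lattice_saturation"],
       [(some ["Smith normal form", "lattice"], "smith_normal_form"),
        (some ["elementary divisors"], "elementary_divisor_comparison")],
       ["lattice_identification"]) =
      (C ++ (if pvContains tl "Smith normal form" || pvContains tl "elementary divisors" ||
                pvContains tl "lattice of Hodge cycles" || pvContains tl "Hodge cycle lattice" ||
                pvContains tl "lattice" then ["lattice_saturation"] else []),
       O ++ (if pvContains tl "Smith normal form" || pvContains tl "elementary divisors" ||
                pvContains tl "lattice of Hodge cycles" || pvContains tl "Hodge cycle lattice" ||
                pvContains tl "lattice" then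
              (if pvContains tl "Smith normal form" || pvContains tl "lattice" then
                ["smith_normal_form"] else []) ++
              (if pvContains tl "elementary divisors" then ["elementary_divisor_comparison"] else [])
             else []),
       T ++ (if pvContains tl "Smith normal form" || pvContains tl "elementary divisors" ||
                pvContains tl "lattice of Hodge cycles" || pvContains tl "Hodge cycle lattice" ||
                pvContains tl "lattice" then ["lattice_identification"] else []),
       M ++ ((if pvContains tl "Smith normal form" then ["Smith normal form"] else []) ++
             ((if pvContains tl "elementary divisors" then ["elementary divisors"] else []) ++
              ((if pvContains tl "lattice of Hodge cycles" then ["lattice of Hodge cycles"] else []) ++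
               ((if pvContains tl "Hodge cycle lattice" then ["Hodge cycle lattice"] else []) ++
                (if pvContains tl "lattice" then ["lattice"] else [])))))) := by
  cases k6 : pvContains tl "Smith normal form" <;> cases k7 : pvContains tl "elementary divisors" <;>
    cases k8 : pvContains tl "lattice of Hodge cycles" <;> cases k9 : pvContains tl "Hodge cycle lattice" <;>
      cases k10 : pvContains tl "lattice" <;>
        simp [pvApplyRule, k6, k7, k8, k9, k10, hC]

theorem altEnriques (tl : String) (C O T M : List String) (hC : "enriques_product" ∉ C) :
    pvApplyRule tl (C, O, T, M) (["Enriques"], ["enriques_product"], [], []) =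
      (C ++ (if pvContains tl "Enriques" then ["enriques_product"] else []), O, T,
       M ++ (if pvContains tl "Enriques" then ["Enriques"] else [])) := by
  cases h : pvContains tl "Enriques" <;> simp [pvApplyRule, h, hC]

theorem altMatroid (tl : String) (C O T M : List String) (hC : "matroidal_parity" ∉ C) :
    pvApplyRule tl (C, O, T, M) (["matroid"], ["matroidal_parity"], [], []) =
      (C ++ (if pvContains tl "matroid" then ["matroidal_parity"] else []), O, T,
       M ++ (if pvContains tl "matroid" then ["matroid"] else [])) := by
  cases h : pvContains tl "matroid" <;> simp [pvApplyRule, h, hC]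

theorem altNodal (tl : String) (C O T M : List String) (hC : "nodal_free_relation" ∉ C) :
    pvApplyRule tl (C, O, T, M)
      (["ordinary double point", "nodal"], ["nodal_free_relation"], [(none, "global_relation")], []) =
      (C ++ (if pvContains tl "ordinary double point" || pvContains tl "nodal" then
              ["nodal_free_relation"] else []),
       O ++ (if pvContains tl "ordinary double point" || pvContains tl "nodal" then
              ["global_relation"] else []), T,
       M ++ ((if pvContains tl "ordinary double point" then ["ordinary double point"] else []) ++
             (if pvContains tl "nodal" then ["nodal"] else []))) := by
  cases h1 : pvContains tl "ordinary double point" <;> cases h2 : pvContains tl "nodal" <;>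
    simp [pvApplyRule, h1, h2, hC]

theorem altStack (tl : String) (C O T M : List String) (hC : "stacky_stabilizer" ∉ C) :
    pvApplyRule tl (C, O, T, M)
      (["quotient stack", "stabilizer", "BG"], ["stacky_stabilizer"], [], ["stacky_realization"]) =
      (C ++ (if pvContains tl "quotient stack" || pvContains tl "stabilizer" ||
                pvContains tl "BG" then ["stacky_stabilizer"] else []), O,
       T ++ (if pvContains tl "quotient stack" || pvContains tl "stabilizer" ||
                pvContains tl "BG" then ["stacky_realization"] else []),
       M ++ ((if pvContains tl "quotient stack" then ["quotient stack"] else []) ++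
             ((if pvContains tl "stabilizer" then ["stabilizer"] else []) ++
              (if pvContains tl "BG" then ["BG"] else [])))) := by
  cases h1 : pvContains tl "quotient stack" <;> cases h2 : pvContains tl "stabilizer" <;>
    cases h3 : pvContains tl "BG" <;> simp [pvApplyRule, h1, h2, h3, hC]

theorem altFermat (tl : String) (C O T M : List String) (hC : "computed_lattice_benchmark" ∉ C) :
    pvApplyRule tl (C, O, T, M) (["Fermat"], ["computed_lattice_benchmark"], [], []) =
      (C ++ (if pvContains tl "Fermat" then ["computed_lattice_benchmark"] else []), O, T,
       M ++ (if pvContains tl "Fermat" then ["Fermat"] else [])) := by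
  cases h : pvContains tl "Fermat" <;> simp [pvApplyRule, h, hC]

-- ===== VERDICT (by name: the statement is the Claim_ definition above) =====
theorem infer_channel_hints_spec : Claim_equal_infer_channel_hints := by
  intro text _
  unfold Spec_infer_channel_hints
  simp only [infer_channel_hints, infer_channel_hints_alt, pvRules,
             List.foldl_cons, List.foldl_nil]
  rw [stUR, stBrauer, stBockstein, stCup, stLattice, stEnriques, stMatroid, stNodal,
      stStack, stFermat,
      altUR, altBrauer, altBockstein, altCup, altLattice, altEnriques, altMatroid,
      altNodal, altStack, altFermat]
  all_goals simp [pv_mem_ite, pv_mem_pvAu, List.mem_append]
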